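-- pv_equiv track=rewrite | github.com/teaguesterling/lq | src/blq/commands/execution.py | _find_similar_commands
-- ===== SOURCE A (Python) =====
-- def _find_similar_commands(name: str, registered: list[str], max_results: int = 3) -> list[str]:
--     """Find registered commands similar to the given name.
--
--     Uses simple heuristics: prefix match, suffix match, and substring match.
--     """
--     if not registered:
--         return []
--
--     name_lower = name.lower()
--     similar = []
--
--     # Exact prefix match (e.g., "tes" -> "test")
--     for cmd in registered:
--         if cmd.lower().startswith(name_lower) or name_lower.startswith(cmd.lower()):
--             similar.append(cmd)
--
--     # Suffix match (e.g., "tests" ends with "test" pattern)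
--     if not similar:
--         for cmd in registered:
--             if cmd.lower().endswith(name_lower) or name_lower.endswith(cmd.lower()):
--                 similar.append(cmd)
--
--     # Substring match
--     if not similar:
--         for cmd in registered:
--             if name_lower in cmd.lower() or cmd.lower() in name_lower:
--                 similar.append(cmd)
--
--     # Simple edit distance for close matches (off by one character)
--     if not similar:
--         for cmd in registered:
--             if abs(len(cmd) - len(name)) <= 2:
--                 # Check if only differs by 1-2 chars
--                 matches = sum(a == b for a, b in zip(name_lower, cmd.lower()))
--                 if matches >= min(len(name), len(cmd)) - 2:
--                     similar.append(cmd)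
--
--     return similar[:max_results]
-- ===== SOURCE B (Python) =====
-- def _find_similar_commands(name: str, registered: list[str], max_results: int = 3) -> list[str]:
--     """Single classification pass: each command gets a match tier (1 prefix, 2 suffix,
--     3 substring, 4 near edit distance); return the commands at the best tier present."""
--     name_lower = name.lower()
--
--     def tier(cmd):
--         c = cmd.lower()
--         if c.startswith(name_lower) or name_lower.startswith(c):
--             return 1
--         if c.endswith(name_lower) or name_lower.endswith(c):
--             return 2
--         if name_lower in c or c in name_lower:
--             return 3
--         if abs(len(cmd) - len(name)) <= 2:
--             matches = sum(a == b for a, b in zip(name_lower, c))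
--             if matches >= min(len(name), len(cmd)) - 2:
--                 return 4
--         return None
--
--     tagged = [(tier(cmd), cmd) for cmd in registered]
--     best = min((t for t, _ in tagged if t is not None), default=None)
--     if best is None:
--         return []
--     return [cmd for t, cmd in tagged if t == best][:max_results]
-- ===== Notes on version B (the rewrite author's own statement) =====
-- stated objective: alternative
-- what changed: Replaced A's four sequential guarded scans of the registry (each gated on the previous scan finding nothing) by a single classification pass that assigns every command a match tier (1 prefix, 2 suffix, 3 substring, 4 near edit distance), then returns the commands carrying the minimum tier present, in order, sliced to max_results.
import Mathlib
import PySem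

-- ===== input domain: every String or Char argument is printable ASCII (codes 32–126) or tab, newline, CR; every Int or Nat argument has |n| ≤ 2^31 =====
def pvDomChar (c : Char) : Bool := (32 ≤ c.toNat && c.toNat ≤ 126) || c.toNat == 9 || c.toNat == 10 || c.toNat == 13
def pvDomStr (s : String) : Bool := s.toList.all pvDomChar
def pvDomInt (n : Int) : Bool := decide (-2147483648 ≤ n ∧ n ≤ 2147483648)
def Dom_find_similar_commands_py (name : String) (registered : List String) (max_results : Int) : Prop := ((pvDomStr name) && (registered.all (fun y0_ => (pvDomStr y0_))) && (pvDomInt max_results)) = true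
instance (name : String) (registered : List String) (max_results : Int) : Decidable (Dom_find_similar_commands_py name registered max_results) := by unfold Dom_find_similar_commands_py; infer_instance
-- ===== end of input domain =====

-- B replaces A's four guarded scans by one classification pass (a match tier per command)
-- plus a best-tier selection; objective: alternative decomposition, same asymptotic cost.


-- ===== PORT A =====
def find_similar_commands_py (name : String) (registered : List String) (max_results : Int) : List String :=
  if registered = [] then []
  else
    let name_lower := PySem.Str.lower name
    -- prefix scan
    let similar := registered.foldl (fun acc cmd =>
      if PySem.Str.startswith (PySem.Str.lower cmd) name_lower
         || PySem.Str.startswith name_lower (PySem.Str.lower cmd)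
      then acc ++ [cmd] else acc) []
    -- suffix scan
    let similar := if similar = [] then
      registered.foldl (fun acc cmd =>
        if PySem.Str.endswith (PySem.Str.lower cmd) name_lower
           || PySem.Str.endswith name_lower (PySem.Str.lower cmd)
        then acc ++ [cmd] else acc) []
      else similar
    -- substring scan
    let similar := if similar = [] then
      registered.foldl (fun acc cmd =>
        if PySem.Str.isIn name_lower (PySem.Str.lower cmd)
           || PySem.Str.isIn (PySem.Str.lower cmd) name_lower
        then acc ++ [cmd] else acc) []
      else similar
    -- edit-distance scan
    let similar := if similar = [] then
      registered.foldl (fun acc cmd =>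
        if (((PySem.Str.len cmd : Int) - (PySem.Str.len name : Int)).natAbs : Int) ≤ 2 then
          let matched : Int := ((name_lower.toList.zip (PySem.Str.lower cmd).toList).map
            (fun ab => if ab.1 = ab.2 then (1 : Int) else 0)).sum
          if matched ≥ min (PySem.Str.len name : Int) (PySem.Str.len cmd : Int) - 2
          then acc ++ [cmd] else acc
        else acc) []
      else similar
    PySem.List.slice similar none (some max_results)

-- ===== PORT B =====
-- Source B's tier(cmd): first matching heuristic, as a number; none if no heuristic fires
def pvTier (name name_lower cmd : String) : Option Nat :=
  let c := PySem.Str.lower cmd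
  if PySem.Str.startswith c name_lower || PySem.Str.startswith name_lower c then some 1
  else if PySem.Str.endswith c name_lower || PySem.Str.endswith name_lower c then some 2
  else if PySem.Str.isIn name_lower c || PySem.Str.isIn c name_lower then some 3
  else if (((PySem.Str.len cmd : Int) - (PySem.Str.len name : Int)).natAbs : Int) ≤ 2
          ∧ ((name_lower.toList.zip c.toList).map
               (fun ab => if ab.1 = ab.2 then (1 : Int) else 0)).sum
             ≥ min (PySem.Str.len name : Int) (PySem.Str.len cmd : Int) - 2
       then some 4
  else none

def find_similar_commands_py_alt (name : String) (registered : List String) (max_results : Int) : List String :=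
  let name_lower := PySem.Str.lower name
  let tagged := registered.map (fun cmd => (pvTier name name_lower cmd, cmd))
  match PySem.List.min? (tagged.filterMap Prod.fst) (fun t => t) with
  | none => []
  | some best =>
      PySem.List.slice (tagged.filterMap (fun tc => if tc.1 = some best then some tc.2 else none))
        none (some max_results)

-- ===== PRECONDITION & SPEC =====
def Spec_find_similar_commands_py (name : String) (registered : List String) (max_results : Int) (out : List String) : Prop := out = find_similar_commands_py_alt name registered max_results
instance (name : String) (registered : List String) (max_results : Int) (out : List String) : Decidable (Spec_find_similar_commands_py name registered max_results out) := by unfold Spec_find_similar_commands_py; infer_instance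

-- ===== CLAIM (what is proved, stated in full; the proofs are below) =====
def Claim_equal_find_similar_commands_py : Prop := ∀ (name : String) (registered : List String) (max_results : Int), Dom_find_similar_commands_py name registered max_results → Spec_find_similar_commands_py name registered max_results (find_similar_commands_py name registered max_results)

-- ===== LEMMAS AND PROOFS =====

-- the four heuristics of A, as Booleans (proof-side names)
def pvQ1 (name_lower cmd : String) : Bool :=
  PySem.Str.startswith (PySem.Str.lower cmd) name_lower
  || PySem.Str.startswith name_lower (PySem.Str.lower cmd)
def pvQ2 (name_lower cmd : String) : Bool :=
  PySem.Str.endswith (PySem.Str.lower cmd) name_lower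
  || PySem.Str.endswith name_lower (PySem.Str.lower cmd)
def pvQ3 (name_lower cmd : String) : Bool :=
  PySem.Str.isIn name_lower (PySem.Str.lower cmd)
  || PySem.Str.isIn (PySem.Str.lower cmd) name_lower
def pvQ4 (name name_lower cmd : String) : Bool :=
  decide ((((PySem.Str.len cmd : Int) - (PySem.Str.len name : Int)).natAbs : Int) ≤ 2
    ∧ ((name_lower.toList.zip (PySem.Str.lower cmd).toList).map
         (fun ab => if ab.1 = ab.2 then (1 : Int) else 0)).sum
       ≥ min (PySem.Str.len name : Int) (PySem.Str.len cmd : Int) - 2)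

theorem pvTier_eq_one {name nl cmd : String} :
    pvTier name nl cmd = some 1 ↔ pvQ1 nl cmd = true := by
  simp only [pvTier]; unfold pvQ1; split_ifs with h1 h2 h3 h4 <;> simp_all

theorem pvTier_eq_two {name nl cmd : String} :
    pvTier name nl cmd = some 2 ↔ (pvQ1 nl cmd = false ∧ pvQ2 nl cmd = true) := by
  simp only [pvTier]; unfold pvQ1 pvQ2; split_ifs with h1 h2 h3 h4 <;> simp_all
  intros; simp_all

theorem pvTier_eq_three {name nl cmd : String} :
    pvTier name nl cmd = some 3 ↔
      (pvQ1 nl cmd = false ∧ pvQ2 nl cmd = false ∧ pvQ3 nl cmd = true) := by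
  simp only [pvTier]; unfold pvQ1 pvQ2 pvQ3; split_ifs with h1 h2 h3 h4 <;> simp_all <;> (intros; simp_all)

theorem pvTier_eq_four {name nl cmd : String} :
    pvTier name nl cmd = some 4 ↔
      (pvQ1 nl cmd = false ∧ pvQ2 nl cmd = false ∧ pvQ3 nl cmd = false
        ∧ pvQ4 name nl cmd = true) := by
  simp only [pvTier]; unfold pvQ1 pvQ2 pvQ3 pvQ4; split_ifs with h1 h2 h3 h4 <;> simp_all <;> (intros; simp_all)

theorem pvTier_cases {name nl cmd : String} :
    pvTier name nl cmd = none ∨ pvTier name nl cmd = some 1 ∨ pvTier name nl cmd = some 2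
    ∨ pvTier name nl cmd = some 3 ∨ pvTier name nl cmd = some 4 := by
  simp only [pvTier]; split_ifs <;> simp

theorem pvTier_eq_none {name nl cmd : String} :
    pvTier name nl cmd = none ↔
      (pvQ1 nl cmd = false ∧ pvQ2 nl cmd = false ∧ pvQ3 nl cmd = false
        ∧ pvQ4 name nl cmd = false) := by
  simp only [pvTier]; unfold pvQ1 pvQ2 pvQ3 pvQ4; split_ifs with h1 h2 h3 h4 <;> simp_all <;> (intros; simp_all)

-- selection by tier is a filter
theorem pvFilterMap_sel (f : String → Option Nat) (b : Nat) (l : List String) :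
    l.filterMap (fun x => if f x = some b then some x else none)
      = l.filter (fun x => f x == some b) := by
  induction l with
  | nil => rfl
  | cons h t ih =>
      simp only [List.filterMap_cons, List.filter_cons]
      by_cases hb : f h = some b <;> simp [hb, ih]

-- the minimum tier is b when b occurs and every occurring tier is ≥ b
theorem pvMin_tiers (f : String → Option Nat) (b : Nat) (l : List String)
    (hmem : ∃ c ∈ l, f c = some b)
    (hlow : ∀ c ∈ l, ∀ t, f c = some t → b ≤ t) :
    PySem.List.min? (l.filterMap f) (fun t => t) = some b := by
  obtain ⟨c, hc, hfc⟩ := hmem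
  have hbmem : b ∈ l.filterMap f := List.mem_filterMap.mpr ⟨c, hc, hfc⟩
  cases hm : PySem.List.min? (l.filterMap f) (fun t => t) with
  | none =>
      have hnil := Iff.mp (PySem.List.min?_eq_none_iff _ _) hm
      rw [hnil] at hbmem
      simp at hbmem
  | some m =>
      have hmmem := PySem.List.min?_mem hm
      obtain ⟨c', hc', hfc'⟩ := List.mem_filterMap.mp hmmem
      have h1 : b ≤ m := hlow c' hc' m hfc'
      have h2 : (fun t => t) m ≤ (fun t => t) b := PySem.List.min?_isMin hm b hbmem
      have hmb : m = b := Nat.le_antisymm h2 h1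
      rw [hmb]

theorem pvTier_pos {name nl cmd : String} {t : Nat} (h : pvTier name nl cmd = some t) :
    1 ≤ t := by
  rcases @pvTier_cases name nl cmd with h' | h' | h' | h' | h' <;> rw [h'] at h <;>
    simp_all <;> omega

theorem pvSliceNil (a b : Option Int) : PySem.List.slice ([] : List String) a b = [] := by
  cases a <;> cases b <;> simp [PySem.List.slice]

-- A's result as nested filters
theorem pvA_eq (name : String) (reg : List String) (k : Int) (hne : reg ≠ []) :
    find_similar_commands_py name reg k =
      PySem.List.slice
        (if reg.filter (fun c => pvQ1 (PySem.Str.lower name) c) = [] then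
          if reg.filter (fun c => pvQ2 (PySem.Str.lower name) c) = [] then
            if reg.filter (fun c => pvQ3 (PySem.Str.lower name) c) = [] then
              reg.filter (fun c => pvQ4 name (PySem.Str.lower name) c)
            else reg.filter (fun c => pvQ3 (PySem.Str.lower name) c)
          else reg.filter (fun c => pvQ2 (PySem.Str.lower name) c)
        else reg.filter (fun c => pvQ1 (PySem.Str.lower name) c)) none (some k) := by
  unfold find_similar_commands_py
  rw [if_neg hne]
  simp only [pvQ1, pvQ2, pvQ3]
  rw [PySem.List.foldl_append_if_eq_filter, PySem.List.foldl_append_if_eq_filter,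
      PySem.List.foldl_append_if_eq_filter]
  have h4 : ∀ acc : List String, reg.foldl (fun acc cmd =>
      if (((PySem.Str.len cmd : Int) - (PySem.Str.len name : Int)).natAbs : Int) ≤ 2 then
        if (((PySem.Str.lower name).toList.zip (PySem.Str.lower cmd).toList).map
              (fun ab => if ab.1 = ab.2 then (1 : Int) else 0)).sum
            ≥ min (PySem.Str.len name : Int) (PySem.Str.len cmd : Int) - 2
        then acc ++ [cmd] else acc
      else acc) acc = acc ++ reg.filter (fun c => pvQ4 name (PySem.Str.lower name) c) := by
    intro acc
    rw [show (fun (acc : List String) cmd =>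
        if (((PySem.Str.len cmd : Int) - (PySem.Str.len name : Int)).natAbs : Int) ≤ 2 then
          if (((PySem.Str.lower name).toList.zip (PySem.Str.lower cmd).toList).map
                (fun ab => if ab.1 = ab.2 then (1 : Int) else 0)).sum
              ≥ min (PySem.Str.len name : Int) (PySem.Str.len cmd : Int) - 2
          then acc ++ [cmd] else acc
        else acc)
      = (fun (acc : List String) cmd =>
          if pvQ4 name (PySem.Str.lower name) cmd then acc ++ [cmd] else acc) from by
        funext acc cmd; unfold pvQ4; split_ifs <;> simp_all <;> omega]
    exact PySem.List.foldl_append_if_eq_filter _ _ _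
  rw [h4]
  simp only [List.nil_append]
  split_ifs <;> simp_all

-- B's result via tier filterMap / filter
theorem pvB_eq (name : String) (reg : List String) (k : Int) :
    find_similar_commands_py_alt name reg k =
      (match PySem.List.min? (reg.filterMap (fun c => pvTier name (PySem.Str.lower name) c))
          (fun t => t) with
       | none => []
       | some b =>
           PySem.List.slice
             (reg.filter (fun c => pvTier name (PySem.Str.lower name) c == some b))
             none (some k)) := by
  unfold find_similar_commands_py_alt
  simp only [List.filterMap_map, Function.comp_def]
  cases PySem.List.min? (reg.filterMap (fun c => pvTier name (PySem.Str.lower name) c))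
      (fun t => t) with
  | none => rfl
  | some b => simp only [pvFilterMap_sel]

-- ===== VERDICT (by name: the statement is the Claim_ definition above) =====
theorem pvFilter_eq_tier_filter (name : String) (reg : List String) (b : Nat)
    (p : String → Bool)
    (h : ∀ c ∈ reg, (pvTier name (PySem.Str.lower name) c = some b ↔ p c = true)) :
    reg.filter p = reg.filter (fun c => pvTier name (PySem.Str.lower name) c == some b) := by
  apply List.filter_congr
  intro c hc
  rw [Bool.eq_iff_iff]
  simp only [beq_iff_eq]
  exact (h c hc).symm

theorem find_similar_commands_py_spec : Claim_equal_find_similar_commands_py := by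
  intro name reg k _
  unfold Spec_find_similar_commands_py
  by_cases hreg : reg = []
  · subst hreg
    simp [find_similar_commands_py, find_similar_commands_py_alt, PySem.List.min?]
  rw [pvA_eq name reg k hreg, pvB_eq]
  by_cases h1 : reg.filter (fun c => pvQ1 (PySem.Str.lower name) c) = []
  case neg =>
    obtain ⟨x, hx⟩ := List.exists_mem_of_ne_nil _ h1
    have hx' := List.mem_filter.mp hx
    rw [pvMin_tiers _ 1 reg ⟨x, hx'.1, pvTier_eq_one.mpr hx'.2⟩
        (fun c _ t ht => pvTier_pos ht)]
    simp only [if_neg h1]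
    rw [pvFilter_eq_tier_filter name reg 1 _ (fun c _ => pvTier_eq_one)]
  have hno1 : ∀ c ∈ reg, pvQ1 (PySem.Str.lower name) c = false := by
    intro c hc
    have := (List.filter_eq_nil_iff.mp h1) c hc
    simpa using this
  by_cases h2 : reg.filter (fun c => pvQ2 (PySem.Str.lower name) c) = []
  case neg =>
    obtain ⟨x, hx⟩ := List.exists_mem_of_ne_nil _ h2
    have hx' := List.mem_filter.mp hx
    have hlow : ∀ c ∈ reg, ∀ t, pvTier name (PySem.Str.lower name) c = some t → 2 ≤ t := by
      intro c hc t ht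
      have hp := pvTier_pos ht
      by_cases h1t : t = 1
      · subst h1t
        have := pvTier_eq_one.mp ht
        rw [hno1 c hc] at this
        cases this
      · omega
    rw [pvMin_tiers _ 2 reg
        ⟨x, hx'.1, pvTier_eq_two.mpr ⟨hno1 x hx'.1, hx'.2⟩⟩ hlow]
    simp only [if_pos h1, if_neg h2]
    rw [pvFilter_eq_tier_filter name reg 2 _ (fun c hc => by
      rw [pvTier_eq_two]
      constructor
      · exact fun h => h.2
      · exact fun h => ⟨hno1 c hc, h⟩)]
  have hno2 : ∀ c ∈ reg, pvQ2 (PySem.Str.lower name) c = false := by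
    intro c hc
    have := (List.filter_eq_nil_iff.mp h2) c hc
    simpa using this
  by_cases h3 : reg.filter (fun c => pvQ3 (PySem.Str.lower name) c) = []
  case neg =>
    obtain ⟨x, hx⟩ := List.exists_mem_of_ne_nil _ h3
    have hx' := List.mem_filter.mp hx
    have hlow : ∀ c ∈ reg, ∀ t, pvTier name (PySem.Str.lower name) c = some t → 3 ≤ t := by
      intro c hc t ht
      have hp := pvTier_pos ht
      by_cases h1t : t = 1
      · subst h1t
        have := pvTier_eq_one.mp ht
        rw [hno1 c hc] at this
        cases this
      by_cases h2t : t = 2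
      · subst h2t
        have := (pvTier_eq_two.mp ht).2
        rw [hno2 c hc] at this
        cases this
      omega
    rw [pvMin_tiers _ 3 reg
        ⟨x, hx'.1, pvTier_eq_three.mpr ⟨hno1 x hx'.1, hno2 x hx'.1, hx'.2⟩⟩ hlow]
    simp only [if_pos h1, if_pos h2, if_neg h3]
    rw [pvFilter_eq_tier_filter name reg 3 _ (fun c hc => by
      rw [pvTier_eq_three]
      constructor
      · exact fun h => h.2.2
      · exact fun h => ⟨hno1 c hc, hno2 c hc, h⟩)]
  have hno3 : ∀ c ∈ reg, pvQ3 (PySem.Str.lower name) c = false := by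
    intro c hc
    have := (List.filter_eq_nil_iff.mp h3) c hc
    simpa using this
  by_cases h4 : reg.filter (fun c => pvQ4 name (PySem.Str.lower name) c) = []
  case neg =>
    obtain ⟨x, hx⟩ := List.exists_mem_of_ne_nil _ h4
    have hx' := List.mem_filter.mp hx
    have hlow : ∀ c ∈ reg, ∀ t, pvTier name (PySem.Str.lower name) c = some t → 4 ≤ t := by
      intro c hc t ht
      have hp := pvTier_pos ht
      by_cases h1t : t = 1
      · subst h1t
        have := pvTier_eq_one.mp ht
        rw [hno1 c hc] at this
        cases this
      by_cases h2t : t = 2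
      · subst h2t
        have := (pvTier_eq_two.mp ht).2
        rw [hno2 c hc] at this
        cases this
      by_cases h3t : t = 3
      · subst h3t
        have := (pvTier_eq_three.mp ht).2.2
        rw [hno3 c hc] at this
        cases this
      omega
    rw [pvMin_tiers _ 4 reg
        ⟨x, hx'.1, pvTier_eq_four.mpr ⟨hno1 x hx'.1, hno2 x hx'.1, hno3 x hx'.1, hx'.2⟩⟩ hlow]
    simp only [if_pos h1, if_pos h2, if_pos h3]
    rw [pvFilter_eq_tier_filter name reg 4 _ (fun c hc => by
      rw [pvTier_eq_four]
      constructor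
      · exact fun h => h.2.2.2
      · exact fun h => ⟨hno1 c hc, hno2 c hc, hno3 c hc, h⟩)]
  -- no heuristic fires anywhere: both sides are []
  have hno4 : ∀ c ∈ reg, pvQ4 name (PySem.Str.lower name) c = false := by
    intro c hc
    have := (List.filter_eq_nil_iff.mp h4) c hc
    simpa using this
  have htiers : reg.filterMap (fun c => pvTier name (PySem.Str.lower name) c) = [] := by
    rw [List.filterMap_eq_nil_iff]
    intro c hc
    exact pvTier_eq_none.mpr ⟨hno1 c hc, hno2 c hc, hno3 c hc, hno4 c hc⟩
  rw [htiers]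
  have hmin : PySem.List.min? ([] : List Nat) (fun t => t) = none := rfl
  rw [hmin]
  simp only [if_pos h1, if_pos h2, if_pos h3]
  rw [h4]
  exact pvSliceNil none (some k)
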